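-- pv_equiv track=rewrite | github.com/mdurnev/glue | py2cpp/py2cpp.py | types
-- ===== SOURCE A (Python) =====
-- def types(n):
--     supported = ["int", "double", "const char*"]
--     result = [[supported[0] for x in range(n)]]
--
--     idx = [0 for x in range(n)]
--     num = len(supported) - 1
--
--     while idx != [num for x in range(n)]:
--         for i in range(n):
--             idx[i] += 1
--             if idx[i] > num:
--                 idx[i] = 0
--             else:
--                 break
--         result.append([supported[x] for x in idx])
--
--     return result
-- ===== SOURCE B (Python) =====
-- def types(n):
--     supported = ["int", "double", "const char*"]
--     if n <= 0:
--         return [[]]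
--     return [[supported[(k // 3 ** i) % 3] for i in range(n)]
--             for k in range(3 ** n)]
-- ===== Notes on version B (the rewrite author's own statement) =====
-- stated objective: alternative
-- what changed: Replaced the mutable odometer (a carry array incremented in place until it reaches the all-max state) by a stateless closed-form enumeration: row k is computed directly from k by base-3 digit extraction.
import Mathlib
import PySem

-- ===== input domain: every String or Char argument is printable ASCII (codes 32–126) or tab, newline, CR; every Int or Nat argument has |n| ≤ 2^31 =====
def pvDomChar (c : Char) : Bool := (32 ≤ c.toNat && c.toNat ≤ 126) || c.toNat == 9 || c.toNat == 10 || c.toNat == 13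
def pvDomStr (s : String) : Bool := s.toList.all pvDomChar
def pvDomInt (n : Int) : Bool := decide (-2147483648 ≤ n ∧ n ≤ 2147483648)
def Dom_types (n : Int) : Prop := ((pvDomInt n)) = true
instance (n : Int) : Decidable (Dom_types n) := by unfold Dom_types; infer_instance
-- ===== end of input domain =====

-- B replaces A's in-place base-3 odometer by a stateless per-index digit extraction (alternative decomposition, same cost).

-- ===== PORT A =====
def supportedL : List String := ["int", "double", "const char*"]

-- the inner 'for i in range(n): idx[i] += 1; …break' — one odometer increment with wraparound
def incIdx : List Nat → List Nat
  | [] => []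
  | x :: xs => if x + 1 > 2 then 0 :: incIdx xs else (x + 1) :: xs

-- the while loop; fuel only makes the recursion total, proved sufficient below
def loopA : Nat → List Nat → List Nat → List (List String) → List (List String)
  | 0, _, _, acc => acc
  | fuel + 1, idx, target, acc =>
    if idx = target then acc
    else
      let idx' := incIdx idx
      loopA fuel idx' target (acc ++ [idx'.map (fun x => supportedL.getD x "")])

def types (n : Int) : List (List String) :=
  let result := [(PySem.List.pyRange 0 n 1).map (fun _ => supportedL.getD 0 "")]
  let idx := (PySem.List.pyRange 0 n 1).map (fun _ => (0 : Nat))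
  let target := (PySem.List.pyRange 0 n 1).map (fun _ => (2 : Nat))  -- [num for x in range(n)], constant across iterations
  loopA (3 ^ n.toNat) idx target result

-- ===== PORT B =====
def supportedB : List String := ["int", "double", "const char*"]

def types_alt (n : Int) : List (List String) :=
  if n ≤ 0 then [[]]
  else
    (List.range (3 ^ n.toNat)).map (fun k =>
      (List.range n.toNat).map (fun i => supportedB.getD (k / 3 ^ i % 3) ""))

-- ===== PRECONDITION & SPEC =====
def Spec_types (n : Int) (out : List (List String)) : Prop := out = types_alt n
instance (n : Int) (out : List (List String)) : Decidable (Spec_types n out) := by unfold Spec_types; infer_instance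

-- ===== CLAIM (what is proved, stated in full; the proofs are below) =====
def Claim_equal_types : Prop := ∀ (n : Int), Dom_types n → Spec_types n (types n)

-- ===== LEMMAS AND PROOFS =====

def digitsB (m k : Nat) : List Nat := (List.range m).map (fun i => k / 3 ^ i % 3)

lemma digitsB_succ (m k : Nat) : digitsB (m + 1) k = k % 3 :: digitsB m (k / 3) := by
  simp [digitsB, List.range_succ_eq_map, List.map_map, Function.comp_def, pow_succ,
    Nat.div_div_eq_div_mul, mul_comm]

lemma incIdx_digitsB (m : Nat) : ∀ k, incIdx (digitsB m k) = digitsB m (k + 1) := by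
  induction m with
  | zero => intro k; simp [digitsB, incIdx]
  | succ m ih =>
    intro k
    rw [digitsB_succ, digitsB_succ]
    by_cases h : k % 3 = 2
    · have h1 : (k + 1) % 3 = 0 := by omega
      have h2 : (k + 1) / 3 = k / 3 + 1 := by omega
      simp [incIdx, h, h1, h2, ih]
    · have h0 : k % 3 < 3 := Nat.mod_lt _ (by norm_num)
      have h1 : (k + 1) % 3 = k % 3 + 1 := by omega
      have h2 : (k + 1) / 3 = k / 3 := by omega
      simp [incIdx, h1, h2]
      omega

lemma digitsB_eq_replicate_iff (m : Nat) : ∀ k, (digitsB m k = List.replicate m 2 ↔ k % 3 ^ m = 3 ^ m - 1) := by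
  induction m with
  | zero => intro k; simp [digitsB, Nat.mod_one]
  | succ m ih =>
    intro k
    rw [digitsB_succ, List.replicate_succ]
    have hp : 0 < 3 ^ m := Nat.pow_pos (by norm_num)
    have hmod : k % 3 ^ (m + 1) = k % 3 + 3 * (k / 3 % 3 ^ m) := by
      rw [pow_succ, mul_comm]
      exact Nat.mod_mul
    have h3 : k % 3 < 3 := Nat.mod_lt _ (by norm_num)
    have h4 : k / 3 % 3 ^ m < 3 ^ m := Nat.mod_lt _ hp
    have hps : 3 ^ (m + 1) = 3 * 3 ^ m := by rw [pow_succ, mul_comm]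
    rw [List.cons_eq_cons, ih (k / 3)]
    omega

lemma loopA_run (m : Nat) (c : Nat) : ∀ k acc, k + c + 1 = 3 ^ m →
    loopA (c + 1) (digitsB m k) (List.replicate m 2) acc
      = acc ++ (List.range c).map (fun j => (digitsB m (k + 1 + j)).map (fun x => supportedL.getD x "")) := by
  induction c with
  | zero =>
    intro k acc hk
    have hk' : k % 3 ^ m = 3 ^ m - 1 := by
      have : k < 3 ^ m := by omega
      rw [Nat.mod_eq_of_lt this]; omega
    simp [loopA, (digitsB_eq_replicate_iff m k).mpr hk']
  | succ c ih =>
    intro k acc hk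
    have hklt : k % 3 ^ m = k := Nat.mod_eq_of_lt (by omega)
    have hne : digitsB m k ≠ List.replicate m 2 := by
      rw [Ne, digitsB_eq_replicate_iff, hklt]; omega
    rw [loopA, if_neg hne]
    show loopA (c + 1) (incIdx (digitsB m k)) _ _ = _
    rw [incIdx_digitsB, ih (k + 1) _ (by omega), List.range_succ_eq_map]
    simp only [List.map_cons, List.map_map, Function.comp_def, List.append_assoc,
      List.singleton_append, Nat.add_zero]
    congr 2
    apply List.map_congr_left
    intro j _
    congr 2
    omega

lemma map_pyRange_const {α : Type} (n : Int) (a : α) :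
    (PySem.List.pyRange 0 n 1).map (fun _ => a) = List.replicate n.toNat a := by
  rw [PySem.List.pyRange_one]
  simp [List.map_map, Function.comp_def, List.map_const']

lemma digitsB_zero (m : Nat) : digitsB m 0 = List.replicate m 0 := by
  simp [digitsB]

theorem types_spec_aux (n : Int) : types n = types_alt n := by
  by_cases hn : n ≤ 0
  · have h0 : n.toNat = 0 := by omega
    simp [types, types_alt, hn, h0, PySem.List.pyRange_one_eq_nil (by omega : n ≤ 0), loopA]
  · have hn0 : 0 < n := by omega
    have hp : 0 < 3 ^ n.toNat := Nat.pow_pos (by norm_num)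
    unfold types types_alt
    rw [if_neg hn]
    rw [map_pyRange_const, map_pyRange_const, map_pyRange_const]
    have hfuel : 3 ^ n.toNat = (3 ^ n.toNat - 1) + 1 := by omega
    rw [← digitsB_zero, hfuel, loopA_run n.toNat (3 ^ n.toNat - 1) 0 _ (by omega)]
    rw [List.range_succ_eq_map]
    simp only [List.map_cons, List.map_map, Function.comp_def, List.singleton_append]
    congr 1
    · simp [List.map_const', supportedL, supportedB]
    · apply List.map_congr_left
      intro j _
      simp [digitsB, List.map_map, Function.comp_def, Nat.add_comm 1 j, supportedL, supportedB]

-- ===== VERDICT (by name: the statement is the Claim_ definition above) =====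
theorem types_spec : Claim_equal_types := by
  intro n _
  exact types_spec_aux n
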